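-- pv_equiv track=rewrite | github.com/aorursy/KT_dataset_py | iaroslavai_deriving-grammatical-gender-rule-for-german-nouns.py | rule_confusion
-- ===== SOURCE A (Python) =====
-- def rule_confusion(rule):
--     """Finds all endings that could be confused in the rule"""
--     endings = [(e, g) for g in rule for e in rule[g]]
--
--     all_confusion = []
--     for end, gen in endings:
--         confusion = []  # which endings can be confused?
--         for end2, gen2 in endings:
--             if end2.endswith(end) and len(end2) > len(end) and gen2 != gen:
--                 confusion.append(end2 + "(" + gen2 + ")")
--
--         if confusion:
--             all_confusion.append(end + "(" + gen + ") can be confused with " + ', '.join(confusion))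
--
--     return all_confusion
-- ===== SOURCE B (Python) =====
-- def rule_confusion(rule):
--     """Finds all endings that could be confused in the rule"""
--     endings = [(e, g) for g in rule for e in rule[g]]
--
--     # Index every proper suffix of every ending once, so the quadratic
--     # all-pairs endswith scan disappears.
--     index = {}
--     for e2, g2 in endings:
--         for j in range(1, len(e2) + 1):
--             index.setdefault(e2[j:], []).append((e2, g2))
--
--     all_confusion = []
--     for end, gen in endings:
--         confusion = [e2 + "(" + g2 + ")" for e2, g2 in index.get(end, []) if g2 != gen]
--         if confusion:
--             all_confusion.append(end + "(" + gen + ") can be confused with " + ', '.join(confusion))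
--
--     return all_confusion
-- ===== Notes on version B (the rewrite author's own statement) =====
-- stated objective: faster
-- what changed: Instead of testing every ordered pair of endings with endswith (all-pairs scan), B builds a dictionary indexing every proper suffix of every ending once and answers each ending's confusion list by a single lookup plus a gender filter.
import Mathlib
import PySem

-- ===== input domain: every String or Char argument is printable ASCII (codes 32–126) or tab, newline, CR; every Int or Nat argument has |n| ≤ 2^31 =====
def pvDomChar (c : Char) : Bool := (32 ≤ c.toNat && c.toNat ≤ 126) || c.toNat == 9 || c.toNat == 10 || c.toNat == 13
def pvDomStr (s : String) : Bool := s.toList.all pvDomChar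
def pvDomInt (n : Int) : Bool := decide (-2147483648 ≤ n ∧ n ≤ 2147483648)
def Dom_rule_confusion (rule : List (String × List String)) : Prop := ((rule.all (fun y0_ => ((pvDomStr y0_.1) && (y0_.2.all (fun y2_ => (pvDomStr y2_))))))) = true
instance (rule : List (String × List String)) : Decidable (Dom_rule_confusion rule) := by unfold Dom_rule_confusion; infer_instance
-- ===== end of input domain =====

-- B replaces A's all-pairs endswith scan by a one-pass index of every proper suffix of every ending
-- (objective: faster — asymptotically fewer comparisons for many endings).


-- ===== PORT A =====
-- shared first line of both Pythons: endings = [(e, g) for g in rule for e in rule[g]]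
def pvEndings (rule : List (String × List String)) : List (String × String) :=
  let d : PySem.Dict String (List String) := PySem.Dict.mk rule
  d.keys.flatMap (fun g => (d.getD g []).map (fun e => (e, g)))

def rule_confusion (rule : List (String × List String)) : List String :=
  let endings := pvEndings rule
  endings.foldl (fun acc p =>
    let confusion : List String := endings.foldl (fun c q =>
      if PySem.Str.endswith q.1 p.1 && decide (PySem.Str.len q.1 > PySem.Str.len p.1) && !(q.2 == p.2)
      then c ++ [q.1 ++ "(" ++ q.2 ++ ")"] else c) []
    if confusion ≠ [] then
      acc ++ [p.1 ++ "(" ++ p.2 ++ ") can be confused with " ++ PySem.Str.join ", " confusion]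
    else acc) []

-- ===== PORT B =====
def rule_confusion_alt (rule : List (String × List String)) : List String :=
  let endings := pvEndings rule
  -- pairs = [(e2[j:], (e2, g2)) for e2, g2 in endings for j in range(1, len(e2) + 1)]
  let pairs : List (String × (String × String)) :=
    endings.flatMap (fun q =>
      (PySem.List.pyRange 1 (PySem.Str.len q.1 + 1)).map
        (fun j => (PySem.Str.slice q.1 (some j) none, q)))
  -- for s, p in pairs: index.setdefault(s, []).append(p)
  let index : PySem.Dict String (List (String × String)) :=
    pairs.foldl (fun d pr => d.modify pr.1 [] (fun v => v ++ [pr.2])) PySem.Dict.empty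
  endings.foldl (fun acc p =>
    let confusion : List String :=
      ((index.getD p.1 []).filter (fun q => !(q.2 == p.2))).map (fun q => q.1 ++ "(" ++ q.2 ++ ")")
    if confusion ≠ [] then
      acc ++ [p.1 ++ "(" ++ p.2 ++ ") can be confused with " ++ PySem.Str.join ", " confusion]
    else acc) []

-- ===== PRECONDITION & SPEC =====
def Spec_rule_confusion (rule : List (String × List String)) (out : List String) : Prop := out = rule_confusion_alt rule
instance (rule : List (String × List String)) (out : List String) : Decidable (Spec_rule_confusion rule out) := by unfold Spec_rule_confusion; infer_instance

-- ===== CLAIM (what is proved, stated in full; the proofs are below) =====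
def Claim_equal_rule_confusion : Prop := ∀ (rule : List (String × List String)), Dom_rule_confusion rule → Spec_rule_confusion rule (rule_confusion rule)

-- ===== LEMMAS AND PROOFS =====

-- a Nodup list whose predicate holds exactly at a filters to the singleton [a]
theorem pv_filter_eq_singleton {α : Type} (l : List α) (p : α → Bool) (a : α)
    (hnd : l.Nodup) (h1 : a ∈ l) (h2 : p a = true) (h3 : ∀ x ∈ l, p x = true → x = a) :
    l.filter p = [a] := by
  induction l with
  | nil => cases h1
  | cons x t ih =>
    rcases List.nodup_cons.mp hnd with ⟨hx, hnt⟩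
    by_cases hxa : x = a
    · subst hxa
      simp only [List.filter_cons, h2, if_pos]
      have : t.filter p = [] := by
        apply List.filter_eq_nil_iff.mpr
        intro y hy hpy
        exact hx ((h3 y (List.mem_cons_of_mem _ hy) hpy) ▸ hy)
      simp [this]
    · have hpx : p x = false := by
        cases hp : p x
        · rfl
        · exact absurd (h3 x (List.mem_cons_self) hp) hxa
      have h1' : a ∈ t := by
        rcases List.mem_cons.mp h1 with h | h
        · exact absurd h.symm hxa
        · exact h
      simp only [List.filter_cons, hpx]
      simp only [Bool.false_eq_true, if_false]
      exact ih hnt h1' (fun x hx' hp => h3 x (List.mem_cons_of_mem _ hx') hp)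

theorem pv_flatMap_if_singleton {α : Type} (l : List α) (p : α → Bool) :
    l.flatMap (fun x => if p x then [x] else []) = l.filter p := by
  induction l with
  | nil => rfl
  | cons x t ih =>
    simp only [List.flatMap_cons, List.filter_cons, ih]
    by_cases h : p x <;> simp [h]

-- which j ∈ range(1, len t + 1) have t[j:] = s: exactly one iff s is a proper suffix of t
theorem pv_range_filter (t s : String) :
    (PySem.List.pyRange 1 (PySem.Str.len t + 1)).filter
        (fun j => PySem.Str.slice t (some j) none == s)
      = if PySem.Str.endswith t s && decide (PySem.Str.len t > PySem.Str.len s)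
        then [PySem.Str.len t - PySem.Str.len s] else [] := by
  have hslice : ∀ j : ℤ, 0 ≤ j → (PySem.Str.slice t (some j) none).toList = t.toList.drop j.toNat := by
    intro j hj
    rw [PySem.Str.toList_slice, PySem.Chars.slice_eq_listSlice, PySem.List.slice_from _ hj]
  have hbeq : ∀ x : String, (x == s) = decide (x.toList = s.toList) := by
    intro x
    by_cases h : x = s
    · simp [h]
    · simp [String.toList_inj, beq_eq_false_iff_ne, h]
  have hrange : PySem.List.pyRange 1 (PySem.Str.len t + 1)
      = (List.range t.toList.length).map (fun k : ℕ => (1 : ℤ) + (k : ℤ)) := by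
    rw [PySem.List.pyRange_one]
    have hn : (PySem.Str.len t + 1 - 1).toNat = t.toList.length := by
      rw [PySem.Str.len_eq]; omega
    rw [hn]
  rw [hrange, List.filter_map]
  have hpred : ∀ k ∈ List.range t.toList.length,
      ((fun j => PySem.Str.slice t (some j) none == s) ∘ (fun k : ℕ => (1 : ℤ) + (k : ℤ))) k
        = decide (t.toList.drop (k + 1) = s.toList) := by
    intro k _
    simp only [Function.comp_def]
    rw [hbeq, hslice _ (by omega)]
    have h1 : ((1 : ℤ) + k).toNat = k + 1 := by omega
    rw [h1]
  rw [List.filter_congr hpred]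
  by_cases hc : s.toList <:+ t.toList ∧ s.toList.length < t.toList.length
  · have hfil : (List.range t.toList.length).filter
        (fun k => decide (t.toList.drop (k + 1) = s.toList))
        = [t.toList.length - s.toList.length - 1] := by
      apply pv_filter_eq_singleton _ _ _ (List.nodup_range)
      · rw [List.mem_range]; omega
      · simp only [decide_eq_true_eq]
        have hdrop := List.suffix_iff_eq_drop.mp hc.1
        have harith : t.toList.length - s.toList.length - 1 + 1
            = t.toList.length - s.toList.length := by omega
        rw [harith]; exact hdrop.symm
      · intro k hk hpk
        rw [List.mem_range] at hk
        have hd := decide_eq_true_eq.mp hpk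
        have hlen := congrArg List.length hd
        rw [List.length_drop] at hlen
        omega
    have hcond : (PySem.Str.endswith t s && decide (PySem.Str.len t > PySem.Str.len s)) = true := by
      rw [PySem.Str.endswith_eq]
      have hlt : s.length < t.length := by
        have h := hc.2
        simp only [String.length_toList] at h
        exact h
      simp [PySem.Chars.endswith_iff, hc.1, PySem.Str.len_eq, hlt]
    rw [hfil, hcond, if_pos rfl]
    simp only [List.map_cons, List.map_nil]
    have h2 := hc.2
    congr 1
    rw [PySem.Str.len_eq, PySem.Str.len_eq]
    omega
  · have hfil : (List.range t.toList.length).filter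
        (fun k => decide (t.toList.drop (k + 1) = s.toList)) = [] := by
      apply List.filter_eq_nil_iff.mpr
      intro k hk hpk
      rw [List.mem_range] at hk
      have hd := decide_eq_true_eq.mp hpk
      have hsuf : s.toList <:+ t.toList := hd ▸ List.drop_suffix (k + 1) t.toList
      have hlen := congrArg List.length hd
      rw [List.length_drop] at hlen
      exact hc ⟨hsuf, by omega⟩
    have hcond : (PySem.Str.endswith t s && decide (PySem.Str.len t > PySem.Str.len s)) = false := by
      rw [PySem.Str.endswith_eq]
      by_cases h1 : s.toList <:+ t.toList
      · have h2 : ¬ s.toList.length < t.toList.length := fun h => hc ⟨h1, h⟩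
        have h2' : t.length ≤ s.length := by
          have h := Nat.le_of_not_lt h2
          simp only [String.length_toList] at h
          exact h
        simp [PySem.Str.len_eq, PySem.Chars.endswith_iff, h1, h2']
      · simp [PySem.Chars.endswith_iff, h1]
    rw [hfil, hcond]
    simp

-- the suffix index at key s lists exactly the endings with s as proper suffix, in order
theorem pv_index_getD (es : List (String × String)) (s : String) :
    ((es.flatMap (fun q =>
        (PySem.List.pyRange 1 (PySem.Str.len q.1 + 1)).map
          (fun j => (PySem.Str.slice q.1 (some j) none, q)))).foldl
        (fun d pr => d.modify pr.1 [] (fun v => v ++ [pr.2])) PySem.Dict.empty).getD s []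
    = es.filter (fun q => PySem.Str.endswith q.1 s && decide (PySem.Str.len q.1 > PySem.Str.len s)) := by
  rw [PySem.Dict.getD_foldl_modify_append]
  rw [PySem.Dict.getD_empty, List.nil_append]
  rw [List.filter_flatMap, List.map_flatMap]
  have hq : ∀ q : String × String,
      List.map (fun x => x.2)
        (List.filter (fun pr => pr.1 == s)
          (List.map (fun j => (PySem.Str.slice q.1 (some j) none, q))
            (PySem.List.pyRange 1 (PySem.Str.len q.1 + 1))))
      = if PySem.Str.endswith q.1 s && decide (PySem.Str.len q.1 > PySem.Str.len s)
        then [q] else [] := by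
    intro q
    rw [List.filter_map, List.map_map]
    have hcomp : ((fun pr : String × (String × String) => pr.1 == s)
        ∘ (fun j => (PySem.Str.slice q.1 (some j) none, q)))
        = (fun j => PySem.Str.slice q.1 (some j) none == s) := rfl
    rw [hcomp, pv_range_filter]
    by_cases h : (PySem.Str.endswith q.1 s && decide (PySem.Str.len q.1 > PySem.Str.len s)) = true
    · rw [if_pos h, if_pos h]; rfl
    · rw [if_neg h, if_neg h]; rfl
  rw [List.flatMap_congr (fun q _ => hq q)]
  exact pv_flatMap_if_singleton es _

-- the two inner loops produce the same confusion list
theorem pv_inner (es : List (String × String)) (p : String × String) :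
    es.foldl (fun c q =>
      if PySem.Str.endswith q.1 p.1 && decide (PySem.Str.len q.1 > PySem.Str.len p.1) && !(q.2 == p.2)
      then c ++ [q.1 ++ "(" ++ q.2 ++ ")"] else c) []
    = ((((es.flatMap (fun q =>
        (PySem.List.pyRange 1 (PySem.Str.len q.1 + 1)).map
          (fun j => (PySem.Str.slice q.1 (some j) none, q)))).foldl
        (fun d pr => d.modify pr.1 [] (fun v => v ++ [pr.2])) PySem.Dict.empty).getD p.1 []).filter
        (fun q => !(q.2 == p.2))).map (fun q => q.1 ++ "(" ++ q.2 ++ ")") := by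
  rw [PySem.List.foldl_append_if, pv_index_getD, List.filter_filter, List.nil_append]
  exact congrArg (List.map _) (List.filter_congr (fun x _ => (Bool.and_comm _ _)))

-- ===== VERDICT (by name: the statement is the Claim_ definition above) =====
theorem rule_confusion_spec : Claim_equal_rule_confusion := by
  intro rule _
  unfold Spec_rule_confusion rule_confusion rule_confusion_alt
  simp only []
  congr 1
  funext acc p
  rw [pv_inner]
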